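-- pv_equiv track=rewrite | github.com/Nurlis03/homeworks | homework-1/task-4.py | bananas
-- ===== SOURCE A (Python) =====
-- import itertools
--
-- def bananas(s) -> set:
--     result = set()
--     pattern = 'banana'
--     enumerated_characters = list(enumerate(s))
--     for iteration in itertools.combinations(enumerated_characters, len(pattern)):
--         characters_list = list(s)
--         if ''.join(j[1] for j in iteration) == pattern:
--             for idx, character in enumerate(s):
--                 if (idx, character) not in iteration:
--                     characters_list[idx] = '-'
--             result.add(''.join(characters_list))
--     return result
-- ===== SOURCE B (Python) =====
-- def bananas(s) -> set:
--     # Backtracking: walk the string once per branch, matching 'banana' letter by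
--     # letter and building the dashed output as we go (take-first = A's
--     # combination order), instead of enumerating all C(n,6) index tuples.
--     def go(rest, pat, acc):
--         if not pat:
--             return [acc + '-' * len(rest)]
--         if not rest:
--             return []
--         taken = go(rest[1:], pat[1:], acc + rest[0]) if rest[0] == pat[0] else []
--         return taken + go(rest[1:], pat, acc + '-')
--     return set(go(s, 'banana', ''))
-- ===== Notes on version B (the rewrite author's own statement) =====
-- stated objective: faster
-- what changed: Replaces the scan of all C(n,6) six-element index combinations (each re-rendered against the whole string) by a backtracking match of the pattern letter by letter that explores only prefixes that can still match, building each dashed output string incrementally.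
import Mathlib
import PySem

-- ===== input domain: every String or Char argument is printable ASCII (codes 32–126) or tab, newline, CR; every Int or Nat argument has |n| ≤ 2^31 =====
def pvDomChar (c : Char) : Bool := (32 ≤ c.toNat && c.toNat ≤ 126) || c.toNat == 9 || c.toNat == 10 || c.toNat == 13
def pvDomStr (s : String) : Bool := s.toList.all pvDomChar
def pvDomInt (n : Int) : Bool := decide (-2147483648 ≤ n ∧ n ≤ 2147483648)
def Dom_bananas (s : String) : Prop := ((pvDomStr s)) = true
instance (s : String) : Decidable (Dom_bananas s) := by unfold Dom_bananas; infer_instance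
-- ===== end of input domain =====

-- B replaces A's scan of all C(n,6) index combinations by backtracking that matches
-- 'banana' letter by letter, generating only valid placements (objective: faster).
-- A returns a Python set; both ports return its distinct elements in insertion order.

-- ===== PORT A =====
-- A's in-place '-'-overwrite of the non-chosen positions of list(s) is ported as the
-- same per-index conditional over enumerate(s).
def bananas (s : String) : List String :=
  let pattern : String := "banana"
  let enumeratedCharacters := PySem.List.enumerate s.toList 0
  (PySem.List.combinations enumeratedCharacters pattern.toList.length).foldl
    (fun result iteration =>
      if iteration.map (·.2) = pattern.toList then
        PySem.Set.add result
          (String.mk ((PySem.List.enumerate s.toList 0).map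
            (fun p => if p ∈ iteration then p.2 else '-')))
      else result)
    PySem.Set.empty

-- ===== PORT B =====
def bananasGo : List Char → List Char → List Char → List (List Char)
  | rest, [], acc => [acc ++ List.replicate rest.length '-']
  | [], _ :: _, _ => []
  | c :: rest, p :: pat, acc =>
      (if c = p then bananasGo rest pat (acc ++ [c]) else [])
        ++ bananasGo rest (p :: pat) (acc ++ ['-'])

def bananas_alt (s : String) : List String :=
  PySem.Set.ofList ((bananasGo s.toList "banana".toList []).map String.mk)

-- ===== PRECONDITION & SPEC =====
def Spec_bananas (s : String) (out : List String) : Prop := out = bananas_alt s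
instance (s : String) (out : List String) : Decidable (Spec_bananas s out) := by unfold Spec_bananas; infer_instance

-- ===== CLAIM (what is proved, stated in full; the proofs are below) =====
def Claim_equal_bananas : Prop := ∀ (s : String), Dom_bananas s → Spec_bananas s (bananas s)

-- ===== LEMMAS AND PROOFS =====

lemma fst_ne_of_mem_enumerate {α : Type} (q : Int × α) (xs : List α) (k : Int)
    (h : q ∈ PySem.List.enumerate xs (k + 1)) : q.1 ≠ k := by
  rcases (PySem.List.mem_enumerate_iff xs (k + 1) q).1 h with ⟨j, hj, rfl⟩
  simp
  omega

lemma go_eq (rest : List Char) : ∀ (pat acc : List Char) (k : Int),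
    bananasGo rest pat acc =
      ((PySem.List.combinations (PySem.List.enumerate rest k) pat.length).filter
          (fun comb => decide (comb.map (·.2) = pat))).map
        (fun comb => acc ++ (PySem.List.enumerate rest k).map
          (fun p => if p ∈ comb then p.2 else '-')) := by
  induction rest with
  | nil =>
    intro pat acc k
    cases pat with
    | nil => simp [bananasGo, PySem.List.combinations_zero]
    | cons p pt => simp [bananasGo, PySem.List.combinations_nil_succ]
  | cons c rest ih =>
    intro pat acc k
    cases pat with
    | nil =>
      simp [bananasGo, PySem.List.combinations_zero, List.map_const',
        PySem.List.length_enumerate, List.replicate_succ]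
    | cons p pt =>
      rw [show (p :: pt).length = pt.length + 1 from rfl,
        PySem.List.enumerate_cons, PySem.List.combinations_cons_succ,
        List.filter_append, List.map_append, List.filter_map, List.map_map]
      have hpart2 :
          (((PySem.List.combinations (PySem.List.enumerate rest (k + 1)) (pt.length + 1)).filter
              (fun comb => decide (comb.map (·.2) = p :: pt))).map
            (fun comb => acc ++ ((k, c) :: PySem.List.enumerate rest (k + 1)).map
              (fun q => if q ∈ comb then q.2 else '-')))
          = bananasGo rest (p :: pt) (acc ++ ['-']) := by
        rw [ih (p :: pt) (acc ++ ['-']) (k + 1)]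
        apply List.map_congr_left
        intro comb hcomb
        have hmem : comb ∈ PySem.List.combinations (PySem.List.enumerate rest (k + 1)) (pt.length + 1) :=
          List.mem_of_mem_filter hcomb
        have hsub : comb.Sublist (PySem.List.enumerate rest (k + 1)) :=
          PySem.List.sublist_of_mem_combinations hmem
        have hnot : ((k : Int), c) ∉ comb := fun hin =>
          fst_ne_of_mem_enumerate (k, c) rest k (hsub.subset hin) rfl
        simp [hnot]
      by_cases hcp : c = p
      · subst hcp
        have hpart1 :
            (((PySem.List.combinations (PySem.List.enumerate rest (k + 1)) pt.length).filter
                (fun t => decide ((((k : Int), c) :: t).map (·.2) = c :: pt))).map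
              (fun t => acc ++ ((k, c) :: PySem.List.enumerate rest (k + 1)).map
                (fun q => if q ∈ ((k, c) :: t) then q.2 else '-')))
            = bananasGo rest pt (acc ++ [c]) := by
          rw [ih pt (acc ++ [c]) (k + 1)]
          have hfilter :
              (fun (t : List (Int × Char)) => decide ((((k : Int), c) :: t).map (·.2) = c :: pt))
              = (fun t => decide (t.map (·.2) = pt)) := by
            funext t; simp
          rw [hfilter]
          apply List.map_congr_left
          intro t ht
          have hsub : t.Sublist (PySem.List.enumerate rest (k + 1)) :=
            PySem.List.sublist_of_mem_combinations (List.mem_of_mem_filter ht)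
          have hren : (PySem.List.enumerate rest (k + 1)).map
                (fun q => if q ∈ ((k, c) :: t) then q.2 else '-')
              = (PySem.List.enumerate rest (k + 1)).map
                (fun q => if q ∈ t then q.2 else '-') := by
            apply List.map_congr_left
            intro q hq
            have hne : q.1 ≠ (k : Int) := fst_ne_of_mem_enumerate q rest k hq
            rcases q with ⟨a, b⟩
            simp only [List.mem_cons, Prod.mk.injEq]
            have : ¬(a = k ∧ b = c) := fun h => hne h.1
            simp [this]
          rw [List.map_cons, if_pos (by simp : ((k : Int), c) ∈ ((k, c) :: t)), hren]
          simp
        simp only [bananasGo]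
        rw [← hpart1, ← hpart2]
        rfl
      · simp only [bananasGo, if_neg hcp, List.nil_append]
        rw [← hpart2]
        have h0 : (List.filter ((fun comb : List (Int × Char) =>
              decide (comb.map (·.2) = p :: pt)) ∘ (fun t => ((k : Int), c) :: t))
            (PySem.List.combinations (PySem.List.enumerate rest (k + 1)) pt.length)) = [] := by
          apply List.filter_eq_nil_iff.mpr
          intro t ht
          simp [hcp]
        rw [h0, List.map_nil, List.nil_append]

lemma foldl_cond_add {α β : Type} [BEq β] (P : α → Prop) [DecidablePred P] (f : α → β) :
    ∀ (l : List α) (S : List β),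
      l.foldl (fun r x => if P x then PySem.Set.add r (f x) else r) S
        = ((l.filter (fun x => decide (P x))).map f).foldl PySem.Set.add S := by
  intro l
  induction l with
  | nil => intro S; rfl
  | cons x xs ih =>
    intro S
    by_cases hx : P x
    · simp [hx, ih]
    · simp [hx, ih]

-- ===== VERDICT (by name: the statement is the Claim_ definition above) =====
theorem bananas_spec : Claim_equal_bananas := by
  intro s _
  unfold Spec_bananas bananas bananas_alt
  simp only []
  rw [foldl_cond_add (fun iteration : List (Int × Char) =>
        iteration.map (·.2) = "banana".toList)
      (fun iteration => String.mk ((PySem.List.enumerate s.toList 0).map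
        (fun p => if p ∈ iteration then p.2 else '-')))]
  rw [go_eq s.toList "banana".toList [] 0]
  rw [PySem.Set.ofList_eq_foldl]
  simp only [List.map_map]
  rfl
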